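-- pv_equiv track=rewrite | github.com/Regan-Yin/Hackathon_Project_Incident_mining_Methanex | safety_analyst.py | _closest_label
-- ===== SOURCE A (Python) =====
-- from typing import Any
--
-- def _closest_label(value: Any, options: list[str], default: str) -> str:
--     if value is None:
--         return default
--     val = str(value).strip()
--     if not val:
--         return default
--     val_low = val.lower()
--     for opt in options:
--         if val_low == opt.lower():
--             return opt
--     for opt in options:
--         if opt.lower() in val_low or val_low in opt.lower():
--             return opt
--     return default
-- ===== SOURCE B (Python) =====
-- def _closest_label(value, options, default):
--     if value is None:
--         return default
--     val_low = str(value).strip().lower()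
--     if not val_low:
--         return default
--     cand = None
--     for opt in options:
--         low = opt.lower()
--         if low == val_low:
--             return opt
--         if cand is None and (low in val_low or val_low in low):
--             cand = opt
--     return cand if cand is not None else default
-- ===== Notes on version B (the rewrite author's own statement) =====
-- stated objective: simpler
-- what changed: A's two sequential scans over options (exact-match scan, then substring scan) are merged into one loop that returns on an exact match and remembers the first substring candidate.
import Mathlib
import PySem

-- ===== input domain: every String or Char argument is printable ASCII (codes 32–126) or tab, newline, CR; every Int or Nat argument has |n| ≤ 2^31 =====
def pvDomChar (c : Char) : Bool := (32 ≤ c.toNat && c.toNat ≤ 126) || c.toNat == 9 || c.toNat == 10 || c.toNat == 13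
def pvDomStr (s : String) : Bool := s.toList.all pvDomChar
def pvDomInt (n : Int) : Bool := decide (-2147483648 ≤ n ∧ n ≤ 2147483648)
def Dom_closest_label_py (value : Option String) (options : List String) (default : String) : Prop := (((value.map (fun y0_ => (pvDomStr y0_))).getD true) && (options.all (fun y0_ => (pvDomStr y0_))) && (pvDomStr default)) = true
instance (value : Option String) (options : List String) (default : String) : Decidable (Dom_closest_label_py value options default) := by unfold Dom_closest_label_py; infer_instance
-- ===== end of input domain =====

-- B merges A's two sequential scans over options into one loop that returns on an
-- exact match and remembers the first substring candidate (objective: simpler).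


-- ===== PORT A =====
-- first loop of A: first option equal (case-insensitively) to val_low
def pvLoopExact (val_low : String) : List String → Option String
  | [] => none
  | opt :: rest =>
    if val_low = PySem.Str.lower opt then some opt else pvLoopExact val_low rest

-- second loop of A: first option related to val_low by substring containment
def pvLoopSub (val_low : String) : List String → Option String
  | [] => none
  | opt :: rest =>
    if PySem.Str.isIn (PySem.Str.lower opt) val_low || PySem.Str.isIn val_low (PySem.Str.lower opt)
    then some opt else pvLoopSub val_low rest

def closest_label_py (value : Option String) (options : List String) (default : String) : String :=
  match value with
  | none => default
  | some v =>
    let val := PySem.Str.strip v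
    if val = "" then default
    else
      let val_low := PySem.Str.lower val
      match pvLoopExact val_low options with
      | some opt => opt
      | none =>
        match pvLoopSub val_low options with
        | some opt => opt
        | none => default

-- ===== PORT B =====
-- B's single loop: return on exact match, remember the first substring candidate
def pvLoopB (val_low default : String) : Option String → List String → String
  | cand, [] => cand.getD default
  | cand, opt :: rest =>
    let low := PySem.Str.lower opt
    if low = val_low then opt
    else if cand.isNone && (PySem.Str.isIn low val_low || PySem.Str.isIn val_low low)
    then pvLoopB val_low default (some opt) rest
    else pvLoopB val_low default cand rest

def closest_label_py_alt (value : Option String) (options : List String) (default : String) : String :=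
  match value with
  | none => default
  | some v =>
    let val_low := PySem.Str.lower (PySem.Str.strip v)
    if val_low = "" then default
    else pvLoopB val_low default none options

-- ===== PRECONDITION & SPEC =====
def Spec_closest_label_py (value : Option String) (options : List String) (default : String) (out : String) : Prop := out = closest_label_py_alt value options default
instance (value : Option String) (options : List String) (default : String) (out : String) : Decidable (Spec_closest_label_py value options default out) := by unfold Spec_closest_label_py; infer_instance

-- ===== CLAIM (what is proved, stated in full; the proofs are below) =====
def Claim_equal_closest_label_py : Prop := ∀ (value : Option String) (options : List String) (default : String), Dom_closest_label_py value options default → Spec_closest_label_py value options default (closest_label_py value options default)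

-- ===== LEMMAS AND PROOFS =====

-- B's single loop computes: first exact match, else the pending candidate, else
-- the first substring match, else the default.
theorem pvLoopB_eq (val_low default : String) (cand : Option String) (opts : List String) :
    pvLoopB val_low default cand opts =
      (pvLoopExact val_low opts).getD
        (cand.getD ((pvLoopSub val_low opts).getD default)) := by
  induction opts generalizing cand with
  | nil => cases cand <;> simp [pvLoopB, pvLoopExact, pvLoopSub]
  | cons opt rest ih =>
    simp only [pvLoopB, pvLoopExact, pvLoopSub]
    by_cases hex : val_low = PySem.Str.lower opt
    · simp [hex]
    · have hex' : ¬ PySem.Str.lower opt = val_low := fun h => hex h.symm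
      cases cand with
      | some c => simp [hex, hex', ih]
      | none =>
        simp only [hex, hex', if_false, ih, Option.isNone_none, Bool.true_and,
          Option.getD_none, Option.getD_some]
        split_ifs <;> simp
-- lowering a string does not change emptiness
theorem pvLower_eq_empty (s : String) : (PySem.Str.lower s = "") ↔ s = "" := by
  constructor
  · intro h
    have h2 : (PySem.Str.lower s).toList = [] := by simp [h]
    rw [PySem.Str.toList_lower] at h2
    have hlen : s.toList.length = 0 := by
      have := congrArg List.length h2
      simpa [PySem.Chars.lower] using this
    exact String.toList_inj.mp (by simp [List.length_eq_zero_iff.mp hlen])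
  · intro h; subst h; rfl

-- ===== VERDICT (by name: the statement is the Claim_ definition above) =====
theorem closest_label_py_spec : Claim_equal_closest_label_py := by
  intro value options default _
  unfold Spec_closest_label_py closest_label_py closest_label_py_alt
  cases value with
  | none => rfl
  | some v =>
    simp only
    by_cases h : PySem.Str.strip v = ""
    · have h2 : PySem.Str.lower (PySem.Str.strip v) = "" := (pvLower_eq_empty _).mpr h
      rw [if_pos h, if_pos h2]
    · have h' : ¬ PySem.Str.lower (PySem.Str.strip v) = "" :=
        fun hc => h ((pvLower_eq_empty _).mp hc)
      rw [if_neg h, if_neg h', pvLoopB_eq]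
      cases pvLoopExact (PySem.Str.lower (PySem.Str.strip v)) options <;>
        cases pvLoopSub (PySem.Str.lower (PySem.Str.strip v)) options <;> simp
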